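-- pv_equiv track=rewrite | github.com/Haroonlatif1/Ncbae_chatbot-v1 | chatbot_project/chatbot/views.py | handle_static_responses
-- ===== SOURCE A (Python) =====
-- def handle_static_responses(prompt):
--     prompts = {
--         "greetings": ["hi", "hello", "hey", "hello there", "hi there", "hey there", "hullo", "hullo there","hlo"],
--         "salam":["AOA","Assalam o alikum","aoa","Aoa","salam"],
--         "introductions": ["what's your name?", "who are you?", "what's your name again?", "what are you called?", "what's your moniker?"],
--         "ncbae_info": ["what's ncbae?", "what is ncbae?", "what does ncbae stand for?", "what's ncbae all about?", "what's the purpose of ncbae?"],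
--         "timings": ["what's ncbae timings?", "Ncbae office timings","ncbae timings","whats ncbae timing","whats ncbae timings","whats ncbae timings?", "what are ncbae timings?", "what time does ncbae open?", "what time does ncbae close?", "what are ncbae's hours?"],
--         "location": ["where is ncbae located?", "what's ncbae address?", "where can i find ncbae?", "what's the location of ncbae?"],
--         "rank": ["what's ncbae rank?","what's rank of ncbae", "what's ncbae ranking?", "is ncbae a good university?", "how good is ncbae?", "what's ncbae's reputation?"],
--         "health": ["how are you", "how r u", "how are u", "how's it going", "how's life", "how's everything", "how are you doing"],
--         "thanks": ["thank you", "thanks", "appreciate it", "thanks a lot", "thanks so much"],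
--         "weather": ["what's the weather like?", "how's the weather?", "what's the weather?", "is it sunny?", "is it raining?"],
--         "offeredcourses":["Which courses does ncbae offer","courses"],
--         "courses":["Which courses does ncbae offer","courses"]
--     }
--
--     responses = {
--         "greetings": "Hi there! How can I help you today?",
--         "introductions": "I'm NCBAE chatbot!",
--         "salam":"Walikum asalam",
--         "ncbae_info": "NCBAE is a private institute which offers a variety of courses",
--         "timings": "NCBAE timings are from 9am to 5pm",
--         "location": "West canal Lahore near Muslim Town",
--         "rank": "In top 300 universities of Pakistan",
--         "health": "I'm just a chatbot, but I'm functioning as expected!",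
--         "thanks": "No problem dear!",
--         "weather": "I can't check the weather right now, but it's usually nice somewhere.",
--         "offeredcourses":"We offer many courses like ADP-CS, BS Accounting and finance ,BS management sciences, ADP-Finance and accounting and much more"
--     }
--
--     for category, prompts_list in prompts.items():
--         if prompt.lower() in [p.lower() for p in prompts_list]:
--             return responses[category]
--
--     return ""
-- ===== SOURCE B (Python) =====
-- _LOOKUP = {
--     'hi': 'Hi there! How can I help you today?',
--     'hello': 'Hi there! How can I help you today?',
--     'hey': 'Hi there! How can I help you today?',
--     'hello there': 'Hi there! How can I help you today?',
--     'hi there': 'Hi there! How can I help you today?',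
--     'hey there': 'Hi there! How can I help you today?',
--     'hullo': 'Hi there! How can I help you today?',
--     'hullo there': 'Hi there! How can I help you today?',
--     'hlo': 'Hi there! How can I help you today?',
--     'aoa': 'Walikum asalam',
--     'assalam o alikum': 'Walikum asalam',
--     'salam': 'Walikum asalam',
--     "what's your name?": "I'm NCBAE chatbot!",
--     'who are you?': "I'm NCBAE chatbot!",
--     "what's your name again?": "I'm NCBAE chatbot!",
--     'what are you called?': "I'm NCBAE chatbot!",
--     "what's your moniker?": "I'm NCBAE chatbot!",
--     "what's ncbae?": 'NCBAE is a private institute which offers a variety of courses',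
--     'what is ncbae?': 'NCBAE is a private institute which offers a variety of courses',
--     'what does ncbae stand for?': 'NCBAE is a private institute which offers a variety of courses',
--     "what's ncbae all about?": 'NCBAE is a private institute which offers a variety of courses',
--     "what's the purpose of ncbae?": 'NCBAE is a private institute which offers a variety of courses',
--     "what's ncbae timings?": 'NCBAE timings are from 9am to 5pm',
--     'ncbae office timings': 'NCBAE timings are from 9am to 5pm',
--     'ncbae timings': 'NCBAE timings are from 9am to 5pm',
--     'whats ncbae timing': 'NCBAE timings are from 9am to 5pm',
--     'whats ncbae timings': 'NCBAE timings are from 9am to 5pm',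
--     'whats ncbae timings?': 'NCBAE timings are from 9am to 5pm',
--     'what are ncbae timings?': 'NCBAE timings are from 9am to 5pm',
--     'what time does ncbae open?': 'NCBAE timings are from 9am to 5pm',
--     'what time does ncbae close?': 'NCBAE timings are from 9am to 5pm',
--     "what are ncbae's hours?": 'NCBAE timings are from 9am to 5pm',
--     'where is ncbae located?': 'West canal Lahore near Muslim Town',
--     "what's ncbae address?": 'West canal Lahore near Muslim Town',
--     'where can i find ncbae?': 'West canal Lahore near Muslim Town',
--     "what's the location of ncbae?": 'West canal Lahore near Muslim Town',
--     "what's ncbae rank?": 'In top 300 universities of Pakistan',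
--     "what's rank of ncbae": 'In top 300 universities of Pakistan',
--     "what's ncbae ranking?": 'In top 300 universities of Pakistan',
--     'is ncbae a good university?': 'In top 300 universities of Pakistan',
--     'how good is ncbae?': 'In top 300 universities of Pakistan',
--     "what's ncbae's reputation?": 'In top 300 universities of Pakistan',
--     'how are you': "I'm just a chatbot, but I'm functioning as expected!",
--     'how r u': "I'm just a chatbot, but I'm functioning as expected!",
--     'how are u': "I'm just a chatbot, but I'm functioning as expected!",
--     "how's it going": "I'm just a chatbot, but I'm functioning as expected!",
--     "how's life": "I'm just a chatbot, but I'm functioning as expected!",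
--     "how's everything": "I'm just a chatbot, but I'm functioning as expected!",
--     'how are you doing': "I'm just a chatbot, but I'm functioning as expected!",
--     'thank you': 'No problem dear!',
--     'thanks': 'No problem dear!',
--     'appreciate it': 'No problem dear!',
--     'thanks a lot': 'No problem dear!',
--     'thanks so much': 'No problem dear!',
--     "what's the weather like?": "I can't check the weather right now, but it's usually nice somewhere.",
--     "how's the weather?": "I can't check the weather right now, but it's usually nice somewhere.",
--     "what's the weather?": "I can't check the weather right now, but it's usually nice somewhere.",
--     'is it sunny?': "I can't check the weather right now, but it's usually nice somewhere.",
--     'is it raining?': "I can't check the weather right now, but it's usually nice somewhere.",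
--     'which courses does ncbae offer': 'We offer many courses like ADP-CS, BS Accounting and finance ,BS management sciences, ADP-Finance and accounting and much more',
--     'courses': 'We offer many courses like ADP-CS, BS Accounting and finance ,BS management sciences, ADP-Finance and accounting and much more',
-- }
--
-- def handle_static_responses(prompt):
--     return _LOOKUP.get(prompt.lower(), "")
-- ===== Notes on version B (the rewrite author's own statement) =====
-- stated objective: faster
-- what changed: Replaced the per-call scan over every category list (lower-casing every stored prompt on each call) by a single precomputed flat dict from lowered prompt to response (first-occurrence-wins, so the response-less 'courses' category is never consulted); each call is one lowercase plus one hash lookup.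
import Mathlib
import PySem

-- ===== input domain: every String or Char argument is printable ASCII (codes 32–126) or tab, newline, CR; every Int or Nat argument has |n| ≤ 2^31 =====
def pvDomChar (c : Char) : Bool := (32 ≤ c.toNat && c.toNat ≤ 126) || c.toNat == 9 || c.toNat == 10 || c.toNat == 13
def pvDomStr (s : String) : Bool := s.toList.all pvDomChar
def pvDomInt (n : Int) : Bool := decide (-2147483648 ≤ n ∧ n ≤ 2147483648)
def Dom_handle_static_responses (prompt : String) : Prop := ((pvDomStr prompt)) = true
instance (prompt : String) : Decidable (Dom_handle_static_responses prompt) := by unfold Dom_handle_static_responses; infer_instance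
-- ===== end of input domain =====

-- B replaces A's per-call nested scan over category lists by one precomputed flat
-- lowered-prompt → response dict, looked up once per call.

-- ===== PORT A =====
-- the `prompts` dict of A, as an insertion-ordered association list (only iterated)
def pvPrompts : List (String × List String) := [
  ("greetings", ["hi", "hello", "hey", "hello there", "hi there", "hey there", "hullo", "hullo there", "hlo"]),
  ("salam", ["AOA", "Assalam o alikum", "aoa", "Aoa", "salam"]),
  ("introductions", ["what's your name?", "who are you?", "what's your name again?", "what are you called?", "what's your moniker?"]),
  ("ncbae_info", ["what's ncbae?", "what is ncbae?", "what does ncbae stand for?", "what's ncbae all about?", "what's the purpose of ncbae?"]),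
  ("timings", ["what's ncbae timings?", "Ncbae office timings", "ncbae timings", "whats ncbae timing", "whats ncbae timings", "whats ncbae timings?", "what are ncbae timings?", "what time does ncbae open?", "what time does ncbae close?", "what are ncbae's hours?"]),
  ("location", ["where is ncbae located?", "what's ncbae address?", "where can i find ncbae?", "what's the location of ncbae?"]),
  ("rank", ["what's ncbae rank?", "what's rank of ncbae", "what's ncbae ranking?", "is ncbae a good university?", "how good is ncbae?", "what's ncbae's reputation?"]),
  ("health", ["how are you", "how r u", "how are u", "how's it going", "how's life", "how's everything", "how are you doing"]),
  ("thanks", ["thank you", "thanks", "appreciate it", "thanks a lot", "thanks so much"]),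
  ("weather", ["what's the weather like?", "how's the weather?", "what's the weather?", "is it sunny?", "is it raining?"]),
  ("offeredcourses", ["Which courses does ncbae offer", "courses"]),
  ("courses", ["Which courses does ncbae offer", "courses"])]

-- the `responses` dict of A
def pvResponses : PySem.Dict String String := PySem.Dict.ofList [
  ("greetings", "Hi there! How can I help you today?"),
  ("introductions", "I'm NCBAE chatbot!"),
  ("salam", "Walikum asalam"),
  ("ncbae_info", "NCBAE is a private institute which offers a variety of courses"),
  ("timings", "NCBAE timings are from 9am to 5pm"),
  ("location", "West canal Lahore near Muslim Town"),
  ("rank", "In top 300 universities of Pakistan"),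
  ("health", "I'm just a chatbot, but I'm functioning as expected!"),
  ("thanks", "No problem dear!"),
  ("weather", "I can't check the weather right now, but it's usually nice somewhere."),
  ("offeredcourses", "We offer many courses like ADP-CS, BS Accounting and finance ,BS management sciences, ADP-Finance and accounting and much more")]

-- A's loop: `for category, prompts_list in prompts.items(): if prompt.lower() in
-- [p.lower() for p in prompts_list]: return responses[category]`.
-- `responses[category]` is ported with getD "": the only key missing from `responses` is
-- "courses", whose prompt list duplicates the earlier "offeredcourses" list, so that branch
-- is unreachable and the Python never raises KeyError.
def pvLoopA (prompt : String) : List (String × List String) → String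
  | [] => ""
  | (cat, ps) :: rest =>
      if PySem.Str.lower prompt ∈ ps.map PySem.Str.lower then pvResponses.getD cat ""
      else pvLoopA prompt rest

def handle_static_responses (prompt : String) : String := pvLoopA prompt pvPrompts

-- ===== PORT B =====
-- Source B's _LOOKUP dict literal: lowered prompt → response, keys distinct
def pvFlat : List (String × String) := [
  ("hi", "Hi there! How can I help you today?"),
  ("hello", "Hi there! How can I help you today?"),
  ("hey", "Hi there! How can I help you today?"),
  ("hello there", "Hi there! How can I help you today?"),
  ("hi there", "Hi there! How can I help you today?"),
  ("hey there", "Hi there! How can I help you today?"),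
  ("hullo", "Hi there! How can I help you today?"),
  ("hullo there", "Hi there! How can I help you today?"),
  ("hlo", "Hi there! How can I help you today?"),
  ("aoa", "Walikum asalam"),
  ("assalam o alikum", "Walikum asalam"),
  ("salam", "Walikum asalam"),
  ("what's your name?", "I'm NCBAE chatbot!"),
  ("who are you?", "I'm NCBAE chatbot!"),
  ("what's your name again?", "I'm NCBAE chatbot!"),
  ("what are you called?", "I'm NCBAE chatbot!"),
  ("what's your moniker?", "I'm NCBAE chatbot!"),
  ("what's ncbae?", "NCBAE is a private institute which offers a variety of courses"),
  ("what is ncbae?", "NCBAE is a private institute which offers a variety of courses"),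
  ("what does ncbae stand for?", "NCBAE is a private institute which offers a variety of courses"),
  ("what's ncbae all about?", "NCBAE is a private institute which offers a variety of courses"),
  ("what's the purpose of ncbae?", "NCBAE is a private institute which offers a variety of courses"),
  ("what's ncbae timings?", "NCBAE timings are from 9am to 5pm"),
  ("ncbae office timings", "NCBAE timings are from 9am to 5pm"),
  ("ncbae timings", "NCBAE timings are from 9am to 5pm"),
  ("whats ncbae timing", "NCBAE timings are from 9am to 5pm"),
  ("whats ncbae timings", "NCBAE timings are from 9am to 5pm"),
  ("whats ncbae timings?", "NCBAE timings are from 9am to 5pm"),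
  ("what are ncbae timings?", "NCBAE timings are from 9am to 5pm"),
  ("what time does ncbae open?", "NCBAE timings are from 9am to 5pm"),
  ("what time does ncbae close?", "NCBAE timings are from 9am to 5pm"),
  ("what are ncbae's hours?", "NCBAE timings are from 9am to 5pm"),
  ("where is ncbae located?", "West canal Lahore near Muslim Town"),
  ("what's ncbae address?", "West canal Lahore near Muslim Town"),
  ("where can i find ncbae?", "West canal Lahore near Muslim Town"),
  ("what's the location of ncbae?", "West canal Lahore near Muslim Town"),
  ("what's ncbae rank?", "In top 300 universities of Pakistan"),
  ("what's rank of ncbae", "In top 300 universities of Pakistan"),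
  ("what's ncbae ranking?", "In top 300 universities of Pakistan"),
  ("is ncbae a good university?", "In top 300 universities of Pakistan"),
  ("how good is ncbae?", "In top 300 universities of Pakistan"),
  ("what's ncbae's reputation?", "In top 300 universities of Pakistan"),
  ("how are you", "I'm just a chatbot, but I'm functioning as expected!"),
  ("how r u", "I'm just a chatbot, but I'm functioning as expected!"),
  ("how are u", "I'm just a chatbot, but I'm functioning as expected!"),
  ("how's it going", "I'm just a chatbot, but I'm functioning as expected!"),
  ("how's life", "I'm just a chatbot, but I'm functioning as expected!"),
  ("how's everything", "I'm just a chatbot, but I'm functioning as expected!"),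
  ("how are you doing", "I'm just a chatbot, but I'm functioning as expected!"),
  ("thank you", "No problem dear!"),
  ("thanks", "No problem dear!"),
  ("appreciate it", "No problem dear!"),
  ("thanks a lot", "No problem dear!"),
  ("thanks so much", "No problem dear!"),
  ("what's the weather like?", "I can't check the weather right now, but it's usually nice somewhere."),
  ("how's the weather?", "I can't check the weather right now, but it's usually nice somewhere."),
  ("what's the weather?", "I can't check the weather right now, but it's usually nice somewhere."),
  ("is it sunny?", "I can't check the weather right now, but it's usually nice somewhere."),
  ("is it raining?", "I can't check the weather right now, but it's usually nice somewhere."),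
  ("which courses does ncbae offer", "We offer many courses like ADP-CS, BS Accounting and finance ,BS management sciences, ADP-Finance and accounting and much more"),
  ("courses", "We offer many courses like ADP-CS, BS Accounting and finance ,BS management sciences, ADP-Finance and accounting and much more")]

def handle_static_responses_alt (prompt : String) : String :=
  (PySem.Dict.mk pvFlat).getD (PySem.Str.lower prompt) ""

-- ===== PRECONDITION & SPEC =====
def Spec_handle_static_responses (prompt : String) (out : String) : Prop := out = handle_static_responses_alt prompt
instance (prompt : String) (out : String) : Decidable (Spec_handle_static_responses prompt out) := by unfold Spec_handle_static_responses; infer_instance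

-- ===== CLAIM =====
def Claim_equal_handle_static_responses : Prop := ∀ (prompt : String), Dom_handle_static_responses prompt → Spec_handle_static_responses prompt (handle_static_responses prompt)

-- ===== LEMMAS AND PROOFS =====

-- A's loop with the lowered prompt abstracted out
def pvLoopK (k : String) : List (String × List String) → String
  | [] => ""
  | (cat, ps) :: rest =>
      if k ∈ ps.map PySem.Str.lower then pvResponses.getD cat ""
      else pvLoopK k rest

def pvKeys : List String := pvFlat.map Prod.fst

lemma pv_loopA_eq_loopK (prompt : String) :
    ∀ t, pvLoopA prompt t = pvLoopK (PySem.Str.lower prompt) t := by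
  intro t
  induction t with
  | nil => rfl
  | cons cp rest ih => cases cp with | mk c ps => simp only [pvLoopA, pvLoopK, ih]

-- every lowered stored prompt is a key of the flat table
set_option maxRecDepth 10000 in
lemma pv_covered :
    (pvPrompts.all (fun cp => cp.2.all (fun p => pvKeys.contains (PySem.Str.lower p)))) = true := by
  decide

-- on each key of the flat table, the two computations agree
set_option maxRecDepth 10000 in
set_option maxHeartbeats 2000000 in
lemma pv_keys_agree :
    (pvKeys.all (fun k => pvLoopK k pvPrompts == (PySem.Dict.mk pvFlat).getD k "")) = true := by
  decide

lemma pv_loopK_nil_of_not_key (k : String) (hk : k ∉ pvKeys) :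
    ∀ (t : List (String × List String)),
      (t.all (fun cp => cp.2.all (fun p => pvKeys.contains (PySem.Str.lower p)))) = true →
      pvLoopK k t = "" := by
  intro t
  induction t with
  | nil => intro _; rfl
  | cons cp rest ih =>
    intro h
    simp only [List.all_cons, Bool.and_eq_true] at h
    cases cp with | mk c ps =>
    simp only [pvLoopK]
    rw [if_neg, ih h.2]
    intro hmem
    rcases List.mem_map.mp hmem with ⟨p, hp, hlow⟩
    have := List.all_eq_true.mp h.1 p hp
    rw [hlow] at this
    exact hk (List.contains_iff_mem.mp this)

lemma pv_get?_none_of_not_key (k : String) :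
    ∀ (l : List (String × String)), k ∉ l.map Prod.fst → (PySem.Dict.mk l).get? k = none := by
  intro l
  induction l with
  | nil => intro _; rfl
  | cons kv rest ih =>
    intro h
    simp only [List.map_cons, List.mem_cons] at h
    push Not at h
    rw [PySem.Dict.get?_mk_cons]
    rw [if_neg (by simpa using fun he => h.1 he.symm), ih h.2]

-- ===== VERDICT =====
theorem handle_static_responses_spec : Claim_equal_handle_static_responses := by
  intro prompt _
  unfold Spec_handle_static_responses handle_static_responses handle_static_responses_alt
  rw [pv_loopA_eq_loopK]
  set k := PySem.Str.lower prompt with hk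
  by_cases hmem : k ∈ pvKeys
  · have := List.all_eq_true.mp pv_keys_agree k hmem
    exact eq_of_beq this
  · rw [pv_loopK_nil_of_not_key k hmem pvPrompts pv_covered,
        PySem.Dict.getD_eq_get?_getD, pv_get?_none_of_not_key k pvFlat (by simpa [pvKeys] using hmem)]
    rfl
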